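-- pv_equiv track=rewrite | github.com/dh-agarwal/chess-ai | detect.py | generate_fen_from_board
-- ===== SOURCE A (Python) =====
-- def generate_fen_from_board(board, white_side='right'):
--     """Generate FEN string with correct orientation"""
--     # If white is on left, flip the board horizontally
--     if white_side == 'left':
--         board = [row[::-1] for row in board]
--
--     # Process ranks from top to bottom (a8 to h1)
--     fen_ranks = []
--     for rank in board:
--         empty_count = 0
--         rank_str = ""
--         for piece in rank:
--             if piece == "":
--                 empty_count += 1
--             else:
--                 if empty_count > 0:
--                     rank_str += str(empty_count)
--                     empty_count = 0
--                 rank_str += piece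
--         if empty_count > 0:
--             rank_str += str(empty_count)
--         fen_ranks.append(rank_str)
--
--     return ("/".join(fen_ranks)) + " w KQkq - 0 1" # eventually add castling rights, en passant, halfmove clock, fullmove number
-- ===== SOURCE B (Python) =====
-- def generate_fen_from_board(board, white_side='right'):
--     """Generate FEN string with correct orientation (run-splitting reimplementation)"""
--     if white_side == 'left':
--         board = [row[::-1] for row in board]
--
--     def runs(rank):
--         parts = []
--         i, n = 0, len(rank)
--         while i < n:
--             j = i
--             if rank[i] == "":
--                 while j < n and rank[j] == "":
--                     j += 1
--                 parts.append(str(j - i))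
--             else:
--                 while j < n and rank[j] != "":
--                     j += 1
--                 parts.append("".join(rank[i:j]))
--             i = j
--         return parts
--
--     return "/".join("".join(runs(rank)) for rank in board) + " w KQkq - 0 1"
-- ===== Notes on version B (the rewrite author's own statement) =====
-- stated objective: alternative
-- what changed: B splits each rank into maximal runs of empty/non-empty cells (a run-peeling loop emitting one fragment per run) instead of A's cell-by-cell loop with a running empty-count and string accumulator.
import Mathlib
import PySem

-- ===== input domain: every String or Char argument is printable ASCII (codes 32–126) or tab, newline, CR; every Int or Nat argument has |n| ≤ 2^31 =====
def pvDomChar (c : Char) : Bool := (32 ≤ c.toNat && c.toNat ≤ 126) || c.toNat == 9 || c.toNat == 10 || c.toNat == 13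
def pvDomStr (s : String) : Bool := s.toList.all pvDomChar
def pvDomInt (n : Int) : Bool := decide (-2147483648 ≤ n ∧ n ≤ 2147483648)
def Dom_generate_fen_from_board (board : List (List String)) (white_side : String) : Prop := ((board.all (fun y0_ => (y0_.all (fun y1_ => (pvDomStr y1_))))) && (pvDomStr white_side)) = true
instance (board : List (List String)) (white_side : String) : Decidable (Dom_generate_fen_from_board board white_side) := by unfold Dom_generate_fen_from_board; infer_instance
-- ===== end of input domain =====

-- B replaces A's running empty-count/string accumulator with a split of each rank
-- into maximal runs of empty / non-empty cells, rendered per run and joined (objective: alternative decomposition).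

-- ===== PORT A =====
-- inner loop body of A: state = (empty_count, rank_str)
def fenStepA (st : Int × String) (piece : String) : Int × String :=
  if piece == "" then (st.1 + 1, st.2)
  else (0, (if st.1 > 0 then st.2 ++ PySem.Int.toStr st.1 else st.2) ++ piece)

-- one rank of A's outer loop
def fenRankA (rank : List String) : String :=
  let st := rank.foldl fenStepA (0, "")
  if st.1 > 0 then st.2 ++ PySem.Int.toStr st.1 else st.2

def generate_fen_from_board (board : List (List String)) (white_side : String) : String :=
  -- row[::-1] ported via PySem.List.slice? (step -1 never returns none)
  PySem.Str.join "/" (((if white_side == "left"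
    then board.map (fun row => (PySem.List.slice? row none none (-1)).getD [])
    else board)).map fenRankA) ++ " w KQkq - 0 1"

-- ===== PORT B =====
-- B's run-peeling while loop: each step consumes one maximal run (takeWhile/dropWhile = the inner j-advancing whiles)
def runsB : List String → List String
  | [] => []
  | p :: rest =>
    if p == "" then
      PySem.Int.toStr (1 + ((rest.takeWhile (fun q => q == "")).length : Int))
        :: runsB (rest.dropWhile (fun q => q == ""))
    else
      PySem.Str.join "" (p :: rest.takeWhile (fun q => !(q == "")))
        :: runsB (rest.dropWhile (fun q => !(q == "")))
termination_by l => l.length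
decreasing_by
  · exact Nat.lt_succ_of_le (List.length_dropWhile_le ..)
  · exact Nat.lt_succ_of_le (List.length_dropWhile_le ..)

def generate_fen_from_board_alt (board : List (List String)) (white_side : String) : String :=
  PySem.Str.join "/" (((if white_side == "left"
    then board.map (fun row => (PySem.List.slice? row none none (-1)).getD [])
    else board)).map (fun rank => PySem.Str.join "" (runsB rank))) ++ " w KQkq - 0 1"

-- ===== PRECONDITION & SPEC =====
def Spec_generate_fen_from_board (board : List (List String)) (white_side : String) (out : String) : Prop := out = generate_fen_from_board_alt board white_side
instance (board : List (List String)) (white_side : String) (out : String) : Decidable (Spec_generate_fen_from_board board white_side out) := by unfold Spec_generate_fen_from_board; infer_instance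

-- ===== CLAIM (what is proved, stated in full; the proofs are below) =====
def Claim_equal_generate_fen_from_board : Prop := ∀ (board : List (List String)) (white_side : String), Dom_generate_fen_from_board board white_side → Spec_generate_fen_from_board board white_side (generate_fen_from_board board white_side)

-- ===== LEMMAS AND PROOFS =====

lemma str_join_nil : PySem.Str.join "" ([] : List String) = "" := by
  simp [PySem.Str.join, PySem.Chars.join, List.intercalate, String.ofList]
  rfl

lemma str_join_cons (a : String) (parts : List String) :
    PySem.Str.join "" (a :: parts) = a ++ PySem.Str.join "" parts := by
  apply String.toList_inj.mp
  have key : ∀ (l : List (List Char)), (List.intersperse ([] : List Char) l).flatten = l.flatten := by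
    intro l
    induction l with
    | nil => simp
    | cons x t ih =>
      cases t with
      | nil => simp
      | cons y r => simp_all [List.intersperse_cons₂]
  simp [PySem.Str.join, PySem.Chars.join, List.intercalate, key]

-- A's finishing step after the inner loop
def finishA (st : Int × String) : String :=
  if st.1 > 0 then st.2 ++ PySem.Int.toStr st.1 else st.2

-- counting an empty run: the fold just accumulates the run's length into the counter
lemma fold_count (rest : List String) : ∀ (c : Int) (s : String),
    rest.foldl fenStepA (c, s)
      = (rest.dropWhile (fun q => q == "")).foldl fenStepA
          (c + ((rest.takeWhile (fun q => q == "")).length : Int), s) := by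
  induction rest with
  | nil => intro c s; simp
  | cons q r ih =>
    intro c s
    by_cases hq : q = ""
    · subst hq
      simp only [List.foldl_cons, List.takeWhile_cons, List.dropWhile_cons]
      simp only [fenStepA]
      rw [ih]
      norm_num
      ring_nf
    · simp only [List.takeWhile_cons, List.dropWhile_cons]
      have : (q == "") = false := by simp [hq]
      simp [this]

-- flattening a non-empty leading run of B
lemma runsB_piece (p : String) (rest : List String) (hp : ¬ p = "") :
    PySem.Str.join "" (runsB (p :: rest)) = p ++ PySem.Str.join "" (runsB rest) := by
  have hpb : (p == "") = false := by simp [hp]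
  rw [runsB]
  simp only [hpb, if_neg Bool.false_ne_true]
  rw [str_join_cons, str_join_cons]
  cases rest with
  | nil => simp [runsB, str_join_nil]
  | cons q r =>
    by_cases hq : q = ""
    · subst hq
      simp [str_join_nil]
    · have hqb : (q == "") = false := by simp [hq]
      rw [runsB]
      simp only [hqb, if_neg Bool.false_ne_true, List.takeWhile_cons, List.dropWhile_cons]
      simp only [Bool.not_false, if_true]
      rw [str_join_cons, str_join_cons]
      simp [String.append_assoc]

-- main invariant: A's inner fold from (0, s) produces s ++ (B's rank string)
lemma main_inv : ∀ (n : Nat) (rank : List String), rank.length ≤ n → ∀ (s : String),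
    finishA (rank.foldl fenStepA (0, s)) = s ++ PySem.Str.join "" (runsB rank) := by
  intro n
  induction n with
  | zero =>
    intro rank h s
    have : rank = [] := List.eq_nil_of_length_eq_zero (Nat.le_zero.mp h)
    subst this
    simp [finishA, runsB, str_join_nil]
  | succ n ih =>
    intro rank h s
    cases rank with
    | nil => simp [finishA, runsB, str_join_nil]
    | cons p rest =>
      by_cases hp : p = ""
      · subst hp
        rw [runsB, if_pos (by simp), str_join_cons]
        simp only [List.foldl_cons, fenStepA]
        norm_num
        rw [fold_count]
        set c : Int := 1 + ((rest.takeWhile (fun q => q == "")).length : Int) with hc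
        have hcpos : 0 < c := by positivity
        rcases hdw : rest.dropWhile (fun q => q == "") with _ | ⟨q, r⟩
        · rw [List.foldl_nil]
          simp [finishA, if_pos hcpos, runsB, str_join_nil]
        · have hq : (q == "") = false := by
            have hne : rest.dropWhile (fun q => q == "") ≠ [] := by simp [hdw]
            have := List.head_dropWhile_not (fun q => q == "") hne
            simpa [hdw] using this
          have step1 : (q :: r).foldl fenStepA (c, s)
              = (q :: r).foldl fenStepA (0, s ++ PySem.Int.toStr c) := by
            simp only [List.foldl_cons, fenStepA, hq, if_neg Bool.false_ne_true,
              if_pos hcpos]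
            norm_num
          rw [step1]
          have hlen : (q :: r).length ≤ n := by
            have h1 : (rest.dropWhile (fun q => q == "")).length ≤ rest.length :=
              List.length_dropWhile_le ..
            rw [hdw] at h1
            simp only [List.length_cons] at h h1 ⊢
            omega
          rw [ih (q :: r) hlen]
          rw [← hdw, String.append_assoc]
      · have hpb : (p == "") = false := by simp [hp]
        simp only [List.foldl_cons, fenStepA, hpb, if_neg Bool.false_ne_true]
        norm_num
        rw [ih rest (by simpa using h), runsB_piece p rest hp, String.append_assoc]

lemma fenRankA_eq (rank : List String) : fenRankA rank = PySem.Str.join "" (runsB rank) := by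
  have := main_inv rank.length rank le_rfl ""
  simpa [fenRankA, finishA] using this

-- ===== VERDICT (by name: the statement is the Claim_ definition above) =====
theorem generate_fen_from_board_spec : Claim_equal_generate_fen_from_board := by
  intro board white_side _
  unfold Spec_generate_fen_from_board generate_fen_from_board generate_fen_from_board_alt
  congr 2
  exact List.map_congr_left (fun rank _ => fenRankA_eq rank)
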